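-- pv_equiv track=rewrite | github.com/zmrdltl/problemSolving | programmers/코딩 기초 트레이닝/커피 심부름.py | solution
-- ===== SOURCE A (Python) =====
-- def solution(order):
--     answer = 0
--     for ord in order:
--         if ord.find("americano") != -1 or ord.find("anything") != -1:
--             answer += 4500
--         else:
--             answer += 5000
--     return answer
-- ===== SOURCE B (Python) =====
-- def solution(order):
--     n = len(order)
--     if n == 0:
--         return 0
--     if n == 1:
--         o = order[0]
--         return 4500 if "americano" in o or "anything" in o else 5000
--     mid = n // 2
--     return solution(order[:mid]) + solution(order[mid:])
-- ===== Notes on version B (the rewrite author's own statement) =====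
-- stated objective: alternative
-- what changed: Replaces A's single linear fold with conditional accumulation by a divide-and-conquer recursion: split the order list in half, solve each half recursively, and add the two subtotals, pricing a single order at the base case.
import Mathlib
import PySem

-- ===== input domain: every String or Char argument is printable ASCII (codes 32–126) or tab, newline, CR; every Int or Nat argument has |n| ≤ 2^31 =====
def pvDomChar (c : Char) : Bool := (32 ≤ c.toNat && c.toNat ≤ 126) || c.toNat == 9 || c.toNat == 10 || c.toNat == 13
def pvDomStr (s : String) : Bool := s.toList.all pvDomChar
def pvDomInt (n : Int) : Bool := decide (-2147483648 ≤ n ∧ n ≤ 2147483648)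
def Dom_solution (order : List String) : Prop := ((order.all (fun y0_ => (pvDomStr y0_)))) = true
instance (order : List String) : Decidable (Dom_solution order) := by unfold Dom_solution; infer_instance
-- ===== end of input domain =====

-- B replaces A's linear conditional fold with a divide-and-conquer recursion (halve, solve halves, add); same results, no speed claim.

-- ===== PORT A =====
def solution (order : List String) : Int :=
  order.foldl (fun answer o =>
    if PySem.Str.find o "americano" ≠ -1 ∨ PySem.Str.find o "anything" ≠ -1 then
      answer + 4500
    else
      answer + 5000) 0

-- ===== PORT B =====
-- order[:mid] / order[mid:] with 0 ≤ mid ≤ len are exactly take/drop; order[0] in the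
-- length-1 branch is the head (the [] arm is unreachable there).
def solution_alt (order : List String) : Int :=
  let n := order.length
  if n = 0 then 0
  else if n = 1 then
    match order with
    | o :: _ => if PySem.Str.isIn "americano" o || PySem.Str.isIn "anything" o then (4500 : Int) else 5000
    | [] => 0
  else
    let mid := n / 2
    solution_alt (order.take mid) + solution_alt (order.drop mid)
termination_by order.length
decreasing_by
  · simp only [List.length_take]; omega
  · simp only [List.length_drop]; omega

-- ===== PRECONDITION & SPEC =====
def Spec_solution (order : List String) (out : Int) : Prop := out = solution_alt order
instance (order : List String) (out : Int) : Decidable (Spec_solution order out) := by unfold Spec_solution; infer_instance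

-- ===== CLAIM (what is proved, stated in full; the proofs are below) =====
def Claim_equal_solution : Prop := ∀ (order : List String), Dom_solution order → Spec_solution order (solution order)

-- ===== LEMMAS AND PROOFS =====
def pvPrice (o : String) : Int :=
  if PySem.Str.isIn "americano" o || PySem.Str.isIn "anything" o then 4500 else 5000

theorem solution_foldl_shift (order : List String) (a : Int) :
    order.foldl (fun answer o =>
      if PySem.Str.find o "americano" ≠ -1 ∨ PySem.Str.find o "anything" ≠ -1 then
        answer + 4500
      else
        answer + 5000) a
    = a + (order.map pvPrice).sum := by
  induction order generalizing a with
  | nil => simp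
  | cons h t ih =>
    simp only [List.foldl_cons, List.map_cons, List.sum_cons, ih]
    have hfind : ∀ sub : String, (PySem.Str.find h sub ≠ -1) ↔ PySem.Str.isIn sub h = true := by
      intro sub
      rw [PySem.Str.find_ne_neg_one_iff, PySem.Str.isIn_iff_infix]
    have hiff : (PySem.Str.find h "americano" ≠ -1 ∨ PySem.Str.find h "anything" ≠ -1)
        ↔ (PySem.Str.isIn "americano" h || PySem.Str.isIn "anything" h) = true := by
      rw [hfind, hfind, Bool.or_eq_true]
    unfold pvPrice
    by_cases hc : (PySem.Str.isIn "americano" h || PySem.Str.isIn "anything" h) = true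
    · rw [if_pos (hiff.mpr hc), if_pos hc]; ring
    · rw [if_neg (fun hx => hc (hiff.mp hx)), if_neg hc]; ring

theorem solution_alt_eq_sum (order : List String) :
    solution_alt order = (order.map pvPrice).sum := by
  generalize hn : order.length = n
  induction n using Nat.strong_induction_on generalizing order with
  | _ n ih =>
    rw [solution_alt.eq_def]
    by_cases h0 : order.length = 0
    · simp [h0, List.length_eq_zero_iff.mp h0]
    · by_cases h1 : order.length = 1
      · obtain ⟨o, ho⟩ := List.length_eq_one_iff.mp h1
        subst ho
        simp [h0, pvPrice]
      · have h2 : 2 ≤ order.length := by omega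
        simp only [h0, h1, if_false]
        rw [ih (order.length / 2) (by omega) _ (by simp; omega),
            ih (order.length - order.length / 2) (by omega) _ (by simp),
            ← List.sum_append, ← List.map_append, List.take_append_drop]

-- ===== VERDICT (by name: the statement is the Claim_ definition above) =====
theorem solution_spec : Claim_equal_solution := by
  intro order _
  unfold Spec_solution solution
  rw [solution_foldl_shift, solution_alt_eq_sum]
  ring
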